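-- pv_equiv track=rewrite | github.com/vllm-project/perf-eval | lib/parse_workload.py | parse_tp
-- ===== SOURCE A (Python) =====
-- def parse_tp(serve_args: str) -> int:
--     """Best-effort parse of the effective parallel-degree (TP * DP) from serve_args.
--
--     `vllm bench serve` reports aggregate throughput; we divide by this to get
--     per-GPU metrics for the dashboard. Falls back to 1 if nothing matches.
--     """
--     toks = serve_args.split()
--     def find(*names):
--         for i, t in enumerate(toks):
--             if t in names and i + 1 < len(toks):
--                 try:
--                     return int(toks[i + 1])
--                 except ValueError:
--                     return None
--             if "=" in t:
--                 key, _, val = t.partition("=")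
--                 if key in names:
--                     try:
--                         return int(val)
--                     except ValueError:
--                         return None
--         return None
--     tp = find("--tensor-parallel-size", "-tp", "--tp") or 1
--     dp = find("--data-parallel-size", "-dp", "--dp") or 1
--     return tp * dp
-- ===== SOURCE B (Python) =====
-- _ALIASES = {
--     "--tensor-parallel-size": "tp", "-tp": "tp", "--tp": "tp",
--     "--data-parallel-size": "dp", "-dp": "dp", "--dp": "dp",
-- }
--
--
-- def parse_tp(serve_args: str) -> int:
--     """Single pass: canonicalise each flag token via an alias table and record the
--     first-seen raw value per group; then convert and default."""
--     toks = serve_args.split()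
--     found = {}
--     for i, t in enumerate(toks):
--         key, eq, val = t.partition("=")
--         if not eq:
--             if i + 1 < len(toks):
--                 key, val = t, toks[i + 1]
--             else:
--                 continue
--         group = _ALIASES.get(key)
--         if group is not None:
--             found.setdefault(group, val)
--
--     def to_int(v):
--         try:
--             return int(v)
--         except ValueError:
--             return None
--
--     tp = (to_int(found["tp"]) if "tp" in found else None) or 1
--     dp = (to_int(found["dp"]) if "dp" in found else None) or 1
--     return tp * dp
-- ===== Notes on version B (the rewrite author's own statement) =====
-- stated objective: idiomatic
-- what changed: B replaces A's two abort-on-first-match rescans of the token list by a single pass that canonicalises each flag token through an alias table into a first-wins dict of group -> raw value, then converts and defaults per group.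
import Mathlib
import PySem

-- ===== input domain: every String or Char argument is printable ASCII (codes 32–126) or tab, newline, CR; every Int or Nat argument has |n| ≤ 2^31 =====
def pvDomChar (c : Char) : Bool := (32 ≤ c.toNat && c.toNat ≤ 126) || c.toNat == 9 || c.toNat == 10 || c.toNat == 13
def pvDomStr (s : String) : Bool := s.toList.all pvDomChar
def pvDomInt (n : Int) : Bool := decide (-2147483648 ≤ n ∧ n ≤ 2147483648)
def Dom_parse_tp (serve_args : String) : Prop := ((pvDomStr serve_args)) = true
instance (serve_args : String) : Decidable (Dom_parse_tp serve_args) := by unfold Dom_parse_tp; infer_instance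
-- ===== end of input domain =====

-- B replaces A's two abort-on-first-match scans by one pass that canonicalises flag
-- tokens through an alias table into a first-wins dict (objective: idiomatic).

-- shared hand-port of Python's t.partition("=") fused with the '"=" in t' test:
-- some (key, val) iff '=' occurs in t, splitting at the FIRST '=' (exact for the 1-char separator)
def pvPartEq : List Char → Option (List Char × List Char)
  | [] => none
  | c :: cs =>
      if c = '=' then some ([], cs)
      else (pvPartEq cs).map (fun kv => (c :: kv.1, kv.2))

-- ===== PORT A =====
-- A's inner `find`: scan tokens; exact alias followed by a token, or `alias=val`; abort to int-or-None
def pvFindA (names : List String) : List String → Option Int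
  | [] => none
  | t :: rest =>
      if t ∈ names ∧ rest ≠ [] then PySem.Int.ofStr? (rest.headD "")
      else
        match pvPartEq t.toList with
        | some kv => if String.ofList kv.1 ∈ names then PySem.Int.ofChars? kv.2 else pvFindA names rest
        | none => pvFindA names rest

def parse_tp (serve_args : String) : Int :=
  let toks := PySem.Str.split₀ serve_args
  let tp : Int := match pvFindA ["--tensor-parallel-size", "-tp", "--tp"] toks with
    | some n => if n = 0 then 1 else n
    | none => 1
  let dp : Int := match pvFindA ["--data-parallel-size", "-dp", "--dp"] toks with
    | some n => if n = 0 then 1 else n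
    | none => 1
  tp * dp

-- ===== PORT B =====
def pvAliases : PySem.Dict String String :=
  PySem.Dict.ofList [("--tensor-parallel-size", "tp"), ("-tp", "tp"), ("--tp", "tp"),
                     ("--data-parallel-size", "dp"), ("-dp", "dp"), ("--dp", "dp")]

-- the single pass of Source B: first-wins dict from alias group to raw value
def pvBuildFound (toks : List String) : PySem.Dict String String :=
  (PySem.List.enumerate toks).foldl (fun d it =>
    let kv? : Option (String × String) :=
      match pvPartEq it.2.toList with
      | some kv => some (String.ofList kv.1, String.ofList kv.2)
      | none =>
          if it.1 + 1 < (toks.length : Int) then some (it.2, PySem.List.pyGetD toks (it.1 + 1) "")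
          else none
    match kv? with
    | some kv =>
        match pvAliases.get? kv.1 with
        | some g => d.setdefault g kv.2
        | none => d
    | none => d) PySem.Dict.empty

def parse_tp_alt (serve_args : String) : Int :=
  let toks := PySem.Str.split₀ serve_args
  let found := pvBuildFound toks
  let tp : Int := match found.get? "tp" with
    | some v => match PySem.Int.ofStr? v with
      | some n => if n = 0 then 1 else n
      | none => 1
    | none => 1
  let dp : Int := match found.get? "dp" with
    | some v => match PySem.Int.ofStr? v with
      | some n => if n = 0 then 1 else n
      | none => 1
    | none => 1
  tp * dp

-- ===== PRECONDITION & SPEC =====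
def Spec_parse_tp (serve_args : String) (out : Int) : Prop := out = parse_tp_alt serve_args
instance (serve_args : String) (out : Int) : Decidable (Spec_parse_tp serve_args out) := by unfold Spec_parse_tp; infer_instance

-- ===== CLAIM (what is proved, stated in full; the proofs are below) =====
def Claim_equal_parse_tp : Prop := ∀ (serve_args : String), Dom_parse_tp serve_args → Spec_parse_tp serve_args (parse_tp serve_args)

-- ===== LEMMAS AND PROOFS =====

-- the common "hit stream": for each token, the (raw key, raw value) pair it contributes, if any
def pvHits : List String → List (String × String)
  | [] => []
  | t :: rest =>
      match pvPartEq t.toList with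
      | some kv => (String.ofList kv.1, String.ofList kv.2) :: pvHits rest
      | none => if rest ≠ [] then (t, rest.headD "") :: pvHits rest else pvHits rest

theorem pvFindA_eq_hits (names : List String)
    (hnames : ∀ n ∈ names, pvPartEq n.toList = none) (toks : List String) :
    pvFindA names toks =
      match (pvHits toks).find? (fun h => decide (h.1 ∈ names)) with
      | some h => PySem.Int.ofStr? h.2
      | none => none := by
  induction toks with
  | nil => rfl
  | cons t rest ih =>
      by_cases ht : t ∈ names
      · have hpart : pvPartEq t.toList = none := hnames t ht
        simp only [pvFindA, pvHits, hpart]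
        by_cases hr : rest ≠ []
        · simp [ht, hr, PySem.Int.ofStr?]
        · simp [ht, hr, ih]
      · simp only [pvFindA, pvHits]
        cases hpart : pvPartEq t.toList with
        | some kv =>
            by_cases hk : String.ofList kv.1 ∈ names
            · simp [ht, hk, PySem.Int.ofStr?]
            · simp [ht, hk, ih]
        | none =>
            by_cases hr : rest ≠ []
            · simp [ht, hr, ih]
            · simp [ht, hr, ih]

-- B's per-token step abstracted over the hit stream
def pvFoldSD (hits : List (String × String)) (d : PySem.Dict String String) : PySem.Dict String String :=
  hits.foldl (fun d h =>
    match pvAliases.get? h.1 with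
    | some g => d.setdefault g h.2
    | none => d) d

theorem pvBuildFound_go (suf : List String) (toks : List String) :
    ∀ (i : Nat), toks.drop i = suf → ∀ d,
      (PySem.List.enumerate suf (i : Int)).foldl (fun d it =>
        let kv? : Option (String × String) :=
          match pvPartEq it.2.toList with
          | some kv => some (String.ofList kv.1, String.ofList kv.2)
          | none =>
              if it.1 + 1 < (toks.length : Int) then some (it.2, PySem.List.pyGetD toks (it.1 + 1) "")
              else none
        match kv? with
        | some kv =>
            match pvAliases.get? kv.1 with
            | some g => d.setdefault g kv.2
            | none => d
        | none => d) d = pvFoldSD (pvHits suf) d := by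
  induction suf with
  | nil => intro i _ d; simp [pvFoldSD, pvHits, PySem.List.enumerate]
  | cons t rest ih =>
      intro i hdrop d
      have hi : i < toks.length := by
        by_contra h
        simp [List.drop_eq_nil_of_le (Nat.le_of_not_lt h)] at hdrop
      have hlen : toks.length = i + rest.length + 1 := by
        have := congrArg List.length hdrop
        simp [List.length_drop] at this
        omega
      have hdrop' : toks.drop (i + 1) = rest := by
        have h2 := congrArg (List.drop 1) hdrop
        simpa [List.drop_drop, Nat.add_comm] using h2
      have hguard : ((i : Int) + 1 < (toks.length : Int)) ↔ rest ≠ [] := by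
        rw [hlen]
        rcases rest with _ | ⟨a, l⟩
        · simp only [List.length_nil, ne_eq, not_true_eq_false, iff_false, not_lt]
          push_cast; omega
        · simp
      have hget : PySem.List.pyGetD toks ((i : Int) + 1) "" = rest.headD "" := by
        have : ((i : Int) + 1) = ((i + 1 : Nat) : Int) := by push_cast; ring
        rw [this, PySem.List.pyGetD_natCast]
        have h1 : toks[i+1]? = rest.head? := by
          rw [← List.head?_drop, hdrop']
        cases rest with
        | nil => simp [List.getD, h1]
        | cons a l => simp [List.getD, h1]
      rw [PySem.List.enumerate_cons, List.foldl_cons]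
      simp only [pvHits]
      cases hpart : pvPartEq t.toList with
      | some kv =>
          simp only [pvFoldSD, List.foldl_cons]
          have : ((i : Int) + 1) = ((i + 1 : Nat) : Int) := by push_cast; ring
          rw [this, ih (i + 1) hdrop']
          rfl
      | none =>
          by_cases hr : rest ≠ []
          · simp only [if_pos (hguard.mpr hr), hget]
            rw [if_pos hr]
            simp only [pvFoldSD, List.foldl_cons]
            have : ((i : Int) + 1) = ((i + 1 : Nat) : Int) := by push_cast; ring
            rw [this, ih (i + 1) hdrop']
            rfl
          · have hguard' : ¬ ((i : Int) + 1 < (toks.length : Int)) := fun h => hr (hguard.mp h)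
            simp only [if_neg hguard']
            rw [if_neg hr]
            have : ((i : Int) + 1) = ((i + 1 : Nat) : Int) := by push_cast; ring
            rw [this, ih (i + 1) hdrop']

theorem pvBuildFound_eq (toks : List String) :
    pvBuildFound toks = pvFoldSD (pvHits toks) PySem.Dict.empty := by
  have := pvBuildFound_go toks toks 0 (by simp) PySem.Dict.empty
  simpa [pvBuildFound] using this

theorem get?_pvFoldSD (hits : List (String × String)) (g : String) :
    ∀ d, (pvFoldSD hits d).get? g =
      (d.get? g).orElse (fun _ => ((hits.find? (fun h => pvAliases.get? h.1 == some g)).map (·.2))) := by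
  induction hits with
  | nil => intro d; cases h : d.get? g <;> simp [pvFoldSD, Option.orElse, h]
  | cons h hs ih =>
      intro d
      cases halias : pvAliases.get? h.1 with
      | none =>
          have step : pvFoldSD (h :: hs) d = pvFoldSD hs d := by
            simp only [pvFoldSD, List.foldl_cons, halias]
          rw [step, ih d, List.find?_cons_of_neg (by simp [halias])]
      | some g' =>
          have step : pvFoldSD (h :: hs) d = pvFoldSD hs (d.setdefault g' h.2) := by
            simp only [pvFoldSD, List.foldl_cons, halias]
          rw [step]
          by_cases hg : g' = g
          · subst hg
            rw [ih (d.setdefault g' h.2), PySem.Dict.get?_setdefault_self,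
                List.find?_cons_of_pos (by simp [halias])]
            cases d.get? g' <;> simp [Option.orElse]
          · rw [ih (d.setdefault g' h.2),
                PySem.Dict.get?_setdefault_of_ne _ _ (fun he => hg he.symm),
                List.find?_cons_of_neg (by simp [halias, hg])]

-- the alias table read back as alias-group membership
set_option maxRecDepth 8192 in
theorem pvAliases_tp (k : String) :
    (pvAliases.get? k = some "tp") ↔ k ∈ ["--tensor-parallel-size", "-tp", "--tp"] := by
  have : pvAliases = PySem.Dict.mk [("--tensor-parallel-size", "tp"), ("-tp", "tp"), ("--tp", "tp"),
      ("--data-parallel-size", "dp"), ("-dp", "dp"), ("--dp", "dp")] := by decide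
  rw [this]
  simp only [PySem.Dict.get?_mk_cons]
  split_ifs with h1 h2 h3 h4 h5 h6
  all_goals simp_all [beq_iff_eq]
  all_goals try (subst_vars; decide)
  constructor
  · intro hx; simp [PySem.Dict.get?] at hx
  · intro hk
    rcases hk with rfl | rfl | rfl <;> simp_all
set_option maxRecDepth 8192 in
theorem pvAliases_dp (k : String) :
    (pvAliases.get? k = some "dp") ↔ k ∈ ["--data-parallel-size", "-dp", "--dp"] := by
  have : pvAliases = PySem.Dict.mk [("--tensor-parallel-size", "tp"), ("-tp", "tp"), ("--tp", "tp"),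
      ("--data-parallel-size", "dp"), ("-dp", "dp"), ("--dp", "dp")] := by decide
  rw [this]
  simp only [PySem.Dict.get?_mk_cons]
  split_ifs with h1 h2 h3 h4 h5 h6
  all_goals simp_all [beq_iff_eq]
  all_goals try (subst_vars; decide)
  constructor
  · intro hx; simp [PySem.Dict.get?] at hx
  · intro hk
    rcases hk with rfl | rfl | rfl <;> simp_all

theorem found_get?_eq (toks : List String) (g : String) (names : List String)
    (hpred : ∀ k, (pvAliases.get? k = some g) ↔ k ∈ names) :
    (pvBuildFound toks).get? g = ((pvHits toks).find? (fun h => decide (h.1 ∈ names))).map (·.2) := by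
  rw [pvBuildFound_eq, get?_pvFoldSD]
  have : (fun (h : String × String) => pvAliases.get? h.1 == some g)
       = (fun (h : String × String) => decide (h.1 ∈ names)) := by
    funext h
    by_cases hk : h.1 ∈ names
    · simp [hk, (hpred h.1).mpr hk]
    · have : pvAliases.get? h.1 ≠ some g := fun he => hk ((hpred h.1).mp he)
      simp [hk, this]
  rw [this]
  simp [PySem.Dict.get?_empty, Option.orElse]

-- ===== VERDICT (by name: the statement is the Claim_ definition above) =====
theorem parse_tp_spec : Claim_equal_parse_tp := by
  intro s _
  unfold Spec_parse_tp parse_tp parse_tp_alt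
  have htp := found_get?_eq (PySem.Str.split₀ s) "tp" ["--tensor-parallel-size", "-tp", "--tp"] pvAliases_tp
  have hdp := found_get?_eq (PySem.Str.split₀ s) "dp" ["--data-parallel-size", "-dp", "--dp"] pvAliases_dp
  have hftp := pvFindA_eq_hits ["--tensor-parallel-size", "-tp", "--tp"] (by decide) (PySem.Str.split₀ s)
  have hfdp := pvFindA_eq_hits ["--data-parallel-size", "-dp", "--dp"] (by decide) (PySem.Str.split₀ s)
  simp only [htp, hdp, hftp, hfdp]
  cases (pvHits (PySem.Str.split₀ s)).find? (fun h => decide (h.1 ∈ ["--tensor-parallel-size", "-tp", "--tp"])) <;>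
    cases (pvHits (PySem.Str.split₀ s)).find? (fun h => decide (h.1 ∈ ["--data-parallel-size", "-dp", "--dp"])) <;>
    simp
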